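-- pv_equiv track=rewrite | github.com/triplelog/math-errors | calculus/checkcorrect.py | fullparen
-- ===== SOURCE A (Python) =====
-- def fullparen(input_string):
-- 	openpar = 0
-- 	isbreak = 0
-- 	cancel_it = 0
-- 	really_cancel = 0
-- 	for idx,i in enumerate(input_string):
-- 		if i == '(':
-- 			openpar = openpar+1
-- 		elif i == ')':
-- 			openpar = openpar-1
-- 		if openpar == 0:
-- 			cancel_it = 1
-- 			isbreak = idx
-- 			break
-- 	if isbreak == len(input_string)-1:
-- 		return True
-- 	else:
-- 		if input_string[0:3] in ['log','sin','cos','tan','cot','sec','csc']: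
-- 			return fullparen(input_string[3:])
-- 		elif input_string[0:2] in ['ln']:
-- 			return fullparen(input_string[2:])
-- 		elif input_string[0:6] in ['arcsin','arccos','arctan','arccot','arcsec','arccsc']:
-- 			return fullparen(input_string[6:])
-- 		else:
-- 			try:
-- 				floatexp = float(input_string)
-- 				return True
-- 			except:
-- 				return False
-- ===== SOURCE B (Python) =====
-- def fullparen(input_string):
--     names = ('arcsin', 'arccos', 'arctan', 'arccot', 'arcsec', 'arccsc',
--              'log', 'sin', 'cos', 'tan', 'cot', 'sec', 'csc', 'ln')
--     pos = 0
--     stripped = True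
--     while stripped:
--         stripped = False
--         for w in names:
--             if input_string.startswith(w, pos):
--                 pos += len(w)
--                 stripped = True
--                 break
--     t = input_string[pos:]
--     bal = 0
--     run = []
--     for c in t:
--         bal += (c == '(') - (c == ')')
--         run.append(bal)
--     zero_at = next((k for k, v in enumerate(run) if v == 0), 0)
--     if zero_at == len(t) - 1:
--         return True
--     try:
--         float(t)
--         return True
--     except ValueError:
--         return False
-- ===== Notes on version B (the rewrite author's own statement) =====
-- stated objective: alternative
-- what changed: A's recursion, which rescans the suffix's paren balance and retries the float parse at every level through three hard-coded prefix-set branches, is replaced by a table-driven loop stripping function names via startswith with a running offset, then one staged pass building the full balance list whose first zero index is looked up, and a single float() attempt.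
import Mathlib
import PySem

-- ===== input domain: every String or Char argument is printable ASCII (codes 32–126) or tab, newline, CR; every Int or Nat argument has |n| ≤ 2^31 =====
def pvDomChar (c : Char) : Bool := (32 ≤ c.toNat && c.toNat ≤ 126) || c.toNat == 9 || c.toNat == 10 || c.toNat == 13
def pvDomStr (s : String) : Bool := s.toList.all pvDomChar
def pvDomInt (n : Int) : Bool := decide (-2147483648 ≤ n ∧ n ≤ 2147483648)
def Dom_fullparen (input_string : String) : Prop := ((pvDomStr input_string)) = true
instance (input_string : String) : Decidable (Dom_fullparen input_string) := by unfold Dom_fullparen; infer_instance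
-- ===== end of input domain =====

-- B replaces A's recursion (which rescans and re-tries the float parse at every level) by a
-- table-driven prefix-stripping pass, a full balance-list pass and one float test (objective: alternative).

-- Shared helper modelling the float() builtin (both Pythons call float()); exact on the ASCII domain.
-- The whitespace float() strips within Dom is ' ', tab, LF, CR.
def pvIsWS (c : Char) : Bool := c = ' ' || c = '\t' || c = '\n' || c = '\r'

-- digit part with single underscores between digits: rest after the first digit was consumed
def pvDigRest : List Char → List Char
  | '_' :: c :: r => if c.isDigit then pvDigRest r else '_' :: c :: r
  | c :: r => if c.isDigit then pvDigRest r else c :: r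
  | [] => []

-- consume a full digit part (at least one digit); none if it does not start with a digit
def pvDigPart? : List Char → Option (List Char)
  | c :: r => if c.isDigit then some (pvDigRest r) else none
  | [] => none

-- after the mantissa: either nothing, or a complete exponent
def pvTailOk : List Char → Bool
  | [] => true
  | c :: r =>
      (c = 'e' || c = 'E') &&
      (let r2 := match r with
                 | s :: r' => if s = '+' || s = '-' then r' else s :: r'
                 | [] => []
       match pvDigPart? r2 with
       | some [] => true
       | _ => false)

-- number := digitpart ['.' [digitpart]] [exp] | '.' digitpart [exp]
def pvNumOk (cs : List Char) : Bool :=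
  match cs with
  | [] => false
  | '.' :: r =>
      match pvDigPart? r with
      | some rest => pvTailOk rest
      | none => false
  | _ =>
      match pvDigPart? cs with
      | none => false
      | some rest =>
          match rest with
          | '.' :: r2 =>
              (match pvDigPart? r2 with
               | some rest2 => pvTailOk rest2
               | none => pvTailOk r2)
          | _ => pvTailOk rest

-- does Python's float(s) succeed? (strip whitespace, optional sign, inf/infinity/nan or a number)
def pvFloatOk (cs : List Char) : Bool :=
  let t := (((cs.dropWhile pvIsWS).reverse.dropWhile pvIsWS).reverse)
  let t := match t with
           | s :: r => if s = '+' || s = '-' then r else s :: r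
           | [] => []
  let low := t.map Char.toLower
  if low = "inf".toList || low = "infinity".toList || low = "nan".toList then true
  else pvNumOk t

-- ===== PORT A =====
-- the for-loop of A: first index at which the running paren balance is 0 after the step
def pvScan : List Char → Int → Nat → Option Nat
  | [], _, _ => none
  | c :: r, op, idx =>
      let op := if c = '(' then op + 1 else if c = ')' then op - 1 else op
      if op = 0 then some idx else pvScan r op (idx + 1)

def pvPre3 : List (List Char) := ["log", "sin", "cos", "tan", "cot", "sec", "csc"].map String.toList
def pvPre6 : List (List Char) :=
  ["arcsin", "arccos", "arctan", "arccot", "arcsec", "arccsc"].map String.toList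

-- facts A's termination needs about a matched prefix
theorem head_of_memK (cs : List Char) (P : List (List Char)) (k : Nat) (hk : 0 < k)
    (hP : ∀ p ∈ P, p.length = k ∧ p.head? ≠ some '(' ∧ p.head? ≠ some ')')
    (h : cs.take k ∈ P) :
    (cs.take k).length = k ∧ ∃ c r, cs = c :: r ∧ c ≠ '(' ∧ c ≠ ')' := by
  obtain ⟨hlen, h1, h2⟩ := hP _ h
  cases cs with
  | nil =>
      exfalso
      simp only [List.take_nil, List.length_nil] at hlen
      omega
  | cons c r =>
      have hh : ((c :: r).take k).head? = some c := by
        cases k with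
        | zero => omega
        | succ m => simp
      refine ⟨hlen, c, r, rfl, ?_, ?_⟩
      · intro hc; subst hc; exact h1 hh
      · intro hc; subst hc; exact h2 hh

theorem len_of_mem3 (cs : List Char) (h : pvPre3.contains (cs.take 3) = true) :
    3 ≤ cs.length := by
  have := (head_of_memK cs pvPre3 3 (by omega) (by decide)
    (by simpa using h)).1
  simp only [List.length_take] at this
  omega

theorem len_of_mem2 (cs : List Char)
    (h : (["ln"].map String.toList).contains (cs.take 2) = true) : 2 ≤ cs.length := by
  have := (head_of_memK cs (["ln"].map String.toList) 2 (by omega) (by decide)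
    (by simpa using h)).1
  simp only [List.length_take] at this
  omega

theorem len_of_mem6 (cs : List Char) (h : pvPre6.contains (cs.take 6) = true) :
    6 ≤ cs.length := by
  have := (head_of_memK cs pvPre6 6 (by omega) (by decide)
    (by simpa using h)).1
  simp only [List.length_take] at this
  omega

def fullparenL (cs : List Char) : Bool :=
  -- isbreak inlined into the condition
  if (match pvScan cs 0 0 with | some i => (i : Int) | none => 0) = (cs.length : Int) - 1 then true
  else if pvPre3.contains (cs.take 3) then fullparenL (cs.drop 3)
  else if (["ln"].map String.toList).contains (cs.take 2) then fullparenL (cs.drop 2)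
  else if pvPre6.contains (cs.take 6) then fullparenL (cs.drop 6)
  else pvFloatOk cs
termination_by cs.length
decreasing_by
  · rename_i h
    have := len_of_mem3 cs h
    simp only [List.length_drop]
    omega
  · rename_i h
    have := len_of_mem2 cs h
    simp only [List.length_drop]
    omega
  · rename_i h
    have := len_of_mem6 cs h
    simp only [List.length_drop]
    omega

def fullparen (input_string : String) : Bool := fullparenL input_string.toList

-- ===== PORT B =====
-- one combined table of recognised function names (Source B's `names` tuple)
def pvNames : List (List Char) :=
  ["arcsin", "arccos", "arctan", "arccot", "arcsec", "arccsc",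
   "log", "sin", "cos", "tan", "cot", "sec", "csc", "ln"].map String.toList

theorem pvNames_pos : ∀ w ∈ pvNames, 0 < w.length := by decide

-- Source B's while/for loop: advance past the first table entry that is a prefix, until none is
-- (the running offset `pos` is carried as the remaining suffix)
def pvStripB (cs : List Char) : List Char :=
  match h : pvNames.find? (fun w => w.isPrefixOf cs) with
  | some w => pvStripB (cs.drop w.length)
  | none => cs
termination_by cs.length
decreasing_by
  have hp : w.isPrefixOf cs = true := by
    simpa using List.find?_some h
  have hm : w ∈ pvNames := List.mem_of_find?_eq_some h
  have hpos := pvNames_pos w hm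
  have hle : w.length ≤ cs.length :=
    (List.isPrefixOf_iff_prefix.mp hp).length_le
  simp only [List.length_drop]
  omega

-- `(c == '(') - (c == ')')` of Source B
def pvDelta (c : Char) : Int := (if c = '(' then (1 : Int) else 0) - (if c = ')' then 1 else 0)

-- Source B's second loop: the full list of running balances
def pvRun : List Char → Int → List Int
  | [], _ => []
  | c :: r, bal =>
      let b := bal + pvDelta c
      b :: pvRun r b

-- `next((k for k, v in enumerate(run) if v == 0), 0)` of Source B
def pvFirstZero (run : List Int) : Int :=
  match run.findIdx? (fun v => v == 0) with
  | some k => (k : Int)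
  | none => 0

def fullparen_alt (input_string : String) : Bool :=
  let t := pvStripB input_string.toList
  let zero_at : Int := pvFirstZero (pvRun t 0)
  if zero_at = (t.length : Int) - 1 then true else pvFloatOk t

-- ===== PRECONDITION & SPEC =====
def Spec_fullparen (input_string : String) (out : Bool) : Prop := out = fullparen_alt input_string
instance (input_string : String) (out : Bool) : Decidable (Spec_fullparen input_string out) := by unfold Spec_fullparen; infer_instance

-- ===== CLAIM (what is proved, stated in full; the proofs are below) =====
def Claim_equal_fullparen : Prop := ∀ (input_string : String), Dom_fullparen input_string → Spec_fullparen input_string (fullparen input_string)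

-- ===== LEMMAS AND PROOFS =====

-- A's strip chain, reified as a standalone function for the proof
def pvStrip (cs : List Char) : List Char :=
  if pvPre3.contains (cs.take 3) then pvStrip (cs.drop 3)
  else if (["ln"].map String.toList).contains (cs.take 2) then pvStrip (cs.drop 2)
  else if pvPre6.contains (cs.take 6) then pvStrip (cs.drop 6)
  else cs
termination_by cs.length
decreasing_by
  · rename_i h
    have := len_of_mem3 cs h
    simp only [List.length_drop]
    omega
  · rename_i h
    have := len_of_mem2 cs h
    simp only [List.length_drop]
    omega
  · rename_i h
    have := len_of_mem6 cs h
    simp only [List.length_drop]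
    omega

-- if a function-name prefix matches, the string starts with a plain letter, so the balance
-- scan breaks at index 0 while the length is ≥ 2: the break condition of A is false.
theorem scan_letter_head (c : Char) (r : List Char) (hc : c ≠ '(' ∧ c ≠ ')') :
    pvScan (c :: r) 0 0 = some 0 := by
  simp [pvScan, hc.1, hc.2]

theorem break_false_of_prefix (cs : List Char) (k : Nat) (hk : 2 ≤ k)
    (hlen : k ≤ cs.length) (hhead : ∃ c r, cs = c :: r ∧ c ≠ '(' ∧ c ≠ ')') :
    ¬ ((match pvScan cs 0 0 with | some i => (i : Int) | none => 0) = (cs.length : Int) - 1) := by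
  obtain ⟨c, r, rfl, hc⟩ := hhead
  have hred : (match pvScan (c :: r) 0 0 with | some i => (i : Int) | none => 0) = 0 := by
    rw [scan_letter_head c r hc]; rfl
  rw [hred]
  simp only [List.length_cons] at hlen ⊢
  intro h
  omega

theorem head3 (cs : List Char) (h : pvPre3.contains (cs.take 3) = true) :
    ∃ c r, cs = c :: r ∧ c ≠ '(' ∧ c ≠ ')' :=
  (head_of_memK cs pvPre3 3 (by omega) (by decide) (by simpa using h)).2

theorem head2 (cs : List Char)
    (h : (["ln"].map String.toList).contains (cs.take 2) = true) :
    ∃ c r, cs = c :: r ∧ c ≠ '(' ∧ c ≠ ')' :=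
  (head_of_memK cs (["ln"].map String.toList) 2 (by omega) (by decide) (by simpa using h)).2

theorem head6 (cs : List Char) (h : pvPre6.contains (cs.take 6) = true) :
    ∃ c r, cs = c :: r ∧ c ≠ '(' ∧ c ≠ ')' :=
  (head_of_memK cs pvPre6 6 (by omega) (by decide) (by simpa using h)).2

-- A equals "strip with A's chain, then test once"
theorem fullparenL_eq_strip (cs : List Char) :
    fullparenL cs =
      (let t := pvStrip cs
       let brk : Int := match pvScan t 0 0 with | some i => (i : Int) | none => 0
       if brk = (t.length : Int) - 1 then true else pvFloatOk t) := by
  induction cs using fullparenL.induct with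
  | case1 cs hbrk =>
      have h3 : ¬ pvPre3.contains (cs.take 3) = true := fun h =>
        (break_false_of_prefix cs 3 (by omega) (len_of_mem3 cs h) (head3 cs h)) hbrk
      have h2 : ¬ (["ln"].map String.toList).contains (cs.take 2) = true := fun h =>
        (break_false_of_prefix cs 2 (by omega) (len_of_mem2 cs h) (head2 cs h)) hbrk
      have h6 : ¬ pvPre6.contains (cs.take 6) = true := fun h =>
        (break_false_of_prefix cs 6 (by omega) (len_of_mem6 cs h) (head6 cs h)) hbrk
      rw [fullparenL, pvStrip]
      simp only [h3, h2, h6, if_pos hbrk]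
      simp [hbrk]
  | case2 cs hbrk h3 ih =>
      rw [fullparenL, pvStrip]
      simp only [if_neg hbrk, if_pos h3]
      exact ih
  | case3 cs hbrk h3 h2 ih =>
      rw [fullparenL, pvStrip]
      simp only [if_neg hbrk, if_neg h3, if_pos h2]
      exact ih
  | case4 cs hbrk h3 h2 h6 ih =>
      rw [fullparenL, pvStrip]
      simp only [if_neg hbrk, if_neg h3, if_neg h2, if_pos h6]
      exact ih
  | case5 cs hbrk h3 h2 h6 =>
      rw [fullparenL, pvStrip]
      have h3' : ¬ (cs.take 3 ∈ pvPre3) := by simpa using h3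
      have h2' : ¬ (cs.take 2 = ['l', 'n']) := by simpa using h2
      have h6' : ¬ (cs.take 6 ∈ pvPre6) := by simpa using h6
      simp [hbrk, h3', h2', h6']

-- ===== B's strip loop equals A's strip chain =====

theorem take_of_isPrefixOf (w cs : List Char) (h : w.isPrefixOf cs = true) :
    cs.take w.length = w :=
  (List.prefix_iff_eq_take.mp (List.isPrefixOf_iff_prefix.mp h)).symm

theorem isPrefixOf_of_take (w cs : List Char) (k : Nat) (hk : w.length = k)
    (h : cs.take k = w) : w.isPrefixOf cs = true :=
  List.isPrefixOf_iff_prefix.mpr (List.prefix_iff_eq_take.mpr (by rw [hk, h]))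

theorem no_c1_of_take2_ln (cs : List Char) (h : cs.take 2 = ['l', 'n']) :
    pvPre3.contains (cs.take 3) = false := by
  cases hc : pvPre3.contains (cs.take 3) with
  | false => rfl
  | true =>
      exfalso
      have hm : cs.take 3 ∈ pvPre3 := by simpa using hc
      have h2 : (cs.take 3).take 2 = cs.take 2 := by simp [List.take_take]
      rw [h] at h2
      simp only [pvPre3] at hm
      simp only [List.map, List.mem_cons, List.not_mem_nil, or_false] at hm
      rcases hm with h3 | h3 | h3 | h3 | h3 | h3 | h3 <;> rw [h3] at h2 <;> simp at h2

theorem strip_c1 (cs : List Char) (h : pvPre3.contains (cs.take 3) = true) :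
    pvStrip cs = pvStrip (cs.drop 3) := by
  have h' : cs.take 3 ∈ pvPre3 := by simpa using h
  rw [pvStrip]; simp [h']

theorem strip_c2 (cs : List Char) (h1 : pvPre3.contains (cs.take 3) = false)
    (h2 : (["ln"].map String.toList).contains (cs.take 2) = true) :
    pvStrip cs = pvStrip (cs.drop 2) := by
  have h1' : ¬ (cs.take 3 ∈ pvPre3) := by simpa using h1
  have h2' : cs.take 2 = ['l', 'n'] := by simpa using h2
  rw [pvStrip]; simp [h1', h2']

theorem strip_c3 (cs : List Char) (h1 : pvPre3.contains (cs.take 3) = false)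
    (h2 : (["ln"].map String.toList).contains (cs.take 2) = false)
    (h3 : pvPre6.contains (cs.take 6) = true) :
    pvStrip cs = pvStrip (cs.drop 6) := by
  have h1' : ¬ (cs.take 3 ∈ pvPre3) := by simpa using h1
  have h2' : ¬ (cs.take 2 = ['l', 'n']) := by simpa using h2
  have h3' : cs.take 6 ∈ pvPre6 := by simpa using h3
  rw [pvStrip]; simp [h1', h2', h3']

theorem strip_c0 (cs : List Char) (h1 : pvPre3.contains (cs.take 3) = false)
    (h2 : (["ln"].map String.toList).contains (cs.take 2) = false)
    (h3 : pvPre6.contains (cs.take 6) = false) :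
    pvStrip cs = cs := by
  have h1' : ¬ (cs.take 3 ∈ pvPre3) := by simpa using h1
  have h2' : ¬ (cs.take 2 = ['l', 'n']) := by simpa using h2
  have h3' : ¬ (cs.take 6 ∈ pvPre6) := by simpa using h3
  rw [pvStrip]; simp [h1', h2', h3']

theorem names_split : ∀ w ∈ pvNames, w ∈ pvPre3 ∨ w = ['l', 'n'] ∨ w ∈ pvPre6 := by decide
theorem pre3_len : ∀ w ∈ pvPre3, w.length = 3 := by decide
theorem pre6_len : ∀ w ∈ pvPre6, w.length = 6 := by decide
theorem pre6_heads : ∀ w ∈ pvPre6, w.take 3 = ['a', 'r', 'c'] := by decide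
theorem mem_names3 : ∀ w ∈ pvPre3, w ∈ pvNames := by decide
theorem mem_names6 : ∀ w ∈ pvPre6, w ∈ pvNames := by decide
theorem ln_mem_names : (['l', 'n'] : List Char) ∈ pvNames := by decide
theorem arc_not_pre3 : pvPre3.contains (['a', 'r', 'c'] : List Char) = false := by decide
theorem ar_not_ln : (["ln"].map String.toList).contains (['a', 'r'] : List Char) = false := by decide

-- one matched table entry performs exactly one step of A's chain
theorem strip_step (cs w : List Char) (hm : w ∈ pvNames) (hp : w.isPrefixOf cs = true) :
    pvStrip cs = pvStrip (cs.drop w.length) := by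
  have ht : cs.take w.length = w := take_of_isPrefixOf w cs hp
  rcases names_split w hm with h | h | h
  · have hl := pre3_len w h
    rw [hl] at ht ⊢
    exact strip_c1 cs (by rw [ht]; simpa using h)
  · subst h
    have ht2 : cs.take 2 = ['l', 'n'] := ht
    exact strip_c2 cs (no_c1_of_take2_ln cs ht2) (by simp [ht2])
  · have hl := pre6_len w h
    rw [hl] at ht ⊢
    have ht3 : cs.take 3 = ['a', 'r', 'c'] := by
      have h36 : (cs.take 6).take 3 = cs.take 3 := by simp [List.take_take]
      rw [← h36, ht]; exact pre6_heads w h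
    have ht2 : cs.take 2 = ['a', 'r'] := by
      have h23 : (cs.take 3).take 2 = cs.take 2 := by simp [List.take_take]
      rw [← h23, ht3]
      rfl
    refine strip_c3 cs ?_ ?_ ?_
    · rw [ht3]; exact arc_not_pre3
    · rw [ht2]; exact ar_not_ln
    · rw [ht]; simpa using h

-- no table entry matches ⟺ none of A's three conditions holds
theorem strip_stop (cs : List Char)
    (h : pvNames.find? (fun w => w.isPrefixOf cs) = none) : pvStrip cs = cs := by
  have hall : ∀ w ∈ pvNames, ¬ (w.isPrefixOf cs = true) := by
    intro w hw
    simpa using List.find?_eq_none.mp h w hw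
  refine strip_c0 cs ?_ ?_ ?_
  · cases hc : pvPre3.contains (cs.take 3) with
    | false => rfl
    | true =>
        exfalso
        have hm : cs.take 3 ∈ pvPre3 := by simpa using hc
        have hk : (cs.take 3).length = 3 := pre3_len _ hm
        exact hall _ (mem_names3 _ hm) (isPrefixOf_of_take _ cs 3 hk rfl)
  · cases hc : (["ln"].map String.toList).contains (cs.take 2) with
    | false => rfl
    | true =>
        exfalso
        have hm : cs.take 2 = ['l', 'n'] := by simpa using hc
        exact hall _ ln_mem_names (isPrefixOf_of_take _ cs 2 rfl hm)
  · cases hc : pvPre6.contains (cs.take 6) with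
    | false => rfl
    | true =>
        exfalso
        have hm : cs.take 6 ∈ pvPre6 := by simpa using hc
        have hk : (cs.take 6).length = 6 := pre6_len _ hm
        exact hall _ (mem_names6 _ hm) (isPrefixOf_of_take _ cs 6 hk rfl)

theorem pvStripB_some (cs w : List Char)
    (h : pvNames.find? (fun w => w.isPrefixOf cs) = some w) :
    pvStripB cs = pvStripB (cs.drop w.length) := by
  rw [pvStripB]
  split
  · rename_i w2 h2
    rw [h] at h2
    cases h2
    rfl
  · rename_i h2
    rw [h] at h2
    cases h2

theorem pvStripB_none (cs : List Char)
    (h : pvNames.find? (fun w => w.isPrefixOf cs) = none) :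
    pvStripB cs = cs := by
  rw [pvStripB]
  split
  · rename_i w2 h2
    rw [h] at h2
    cases h2
  · rfl

theorem stripB_eq (cs : List Char) : pvStripB cs = pvStrip cs := by
  induction cs using pvStripB.induct with
  | case1 cs w h ih =>
      rw [pvStripB_some cs w h, ih]
      exact (strip_step cs w (List.mem_of_find?_eq_some h) (by simpa using List.find?_some h)).symm
  | case2 cs h =>
      rw [pvStripB_none cs h]
      exact (strip_stop cs h).symm

-- ===== B's balance list + findIdx? equals A's breaking scan =====

theorem scan_eq_run (cs : List Char) (b : Int) (i : Nat) :
    pvScan cs b i = ((pvRun cs b).findIdx? (fun v => v == 0)).map (fun k => k + i) := by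
  induction cs generalizing b i with
  | nil => simp [pvScan, pvRun]
  | cons c r ih =>
      have hop : (if c = '(' then b + 1 else if c = ')' then b - 1 else b) = b + pvDelta c := by
        unfold pvDelta
        by_cases h1 : c = '('
        · simp [h1]
        · by_cases h2 : c = ')'
          · simp [h1, h2]; ring
          · simp [h1, h2]
      rw [pvScan, pvRun]
      simp only [hop, List.findIdx?_cons]
      by_cases h0 : b + pvDelta c = 0
      · simp [h0]
      · have : ((b + pvDelta c) == 0) = false := by simpa using h0
        rw [if_neg h0, this, ih]
        cases hfi : (pvRun r (b + pvDelta c)).findIdx? (fun v => v == 0) with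
        | none => simp [hfi]
        | some k => simp [hfi]; omega

theorem scanIdx_eq (t : List Char) :
    (match pvScan t 0 0 with | some i => (i : Int) | none => 0) = pvFirstZero (pvRun t 0) := by
  unfold pvFirstZero
  rw [scan_eq_run t 0 0]
  cases h : (pvRun t 0).findIdx? (fun v => v == 0) with
  | none => simp
  | some k => simp

-- ===== VERDICT (by name: the statement is the Claim_ definition above) =====
theorem fullparen_spec : Claim_equal_fullparen := by
  intro s _
  unfold Spec_fullparen fullparen fullparen_alt
  rw [fullparenL_eq_strip, ← stripB_eq]
  simp only [scanIdx_eq]
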